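-- pv_equiv track=rewrite | github.com/T9404/EGE | Python/ЕГЭ2021;2022/23/Задания из kompege/3084.py | f
-- ===== SOURCE A (Python) =====
-- def f(s, e):
--     if s > e:
--         return 0
--     elif s == e:
--         return 1
--     else:
--         s_num = sum(map(int, str(s)))
--         return f(s+2, e)+f(s+s_num, e)
-- ===== SOURCE B (Python) =====
-- def f(s, e):
--     if s > e:
--         return 0
--     m = e - s
--     dp = [0] * (m + 1)
--     dp[m] = 1
--     for i in range(m - 1, -1, -1):
--         ds = sum(map(int, str(abs(s + i))))
--         acc = dp[i + 2] if i + 2 <= m else 0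
--         if i + ds <= m:
--             acc += dp[i + ds]
--         dp[i] = acc
--     return dp[0]
-- ===== Notes on version B (the rewrite author's own statement) =====
-- stated objective: alternative
-- what changed: Replaced A's top-down branching recursion by a bottom-up dynamic-programming pass over an array indexed by the offset from s, filling path counts from e down to s; each count is computed once instead of once per path.
import Mathlib
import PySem

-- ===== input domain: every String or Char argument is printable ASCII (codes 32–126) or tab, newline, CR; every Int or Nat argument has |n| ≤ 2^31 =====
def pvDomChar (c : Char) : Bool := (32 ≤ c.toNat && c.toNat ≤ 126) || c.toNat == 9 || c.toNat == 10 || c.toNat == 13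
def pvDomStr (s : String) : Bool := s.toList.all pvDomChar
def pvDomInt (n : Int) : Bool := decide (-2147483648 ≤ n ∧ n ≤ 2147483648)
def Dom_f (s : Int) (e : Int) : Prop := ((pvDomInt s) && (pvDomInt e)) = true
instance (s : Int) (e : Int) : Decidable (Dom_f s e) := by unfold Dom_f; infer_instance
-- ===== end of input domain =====

-- B replaces A's branching recursion by a bottom-up DP array over the offsets from s, computing each count once.

-- ===== PORT A =====
-- int(c) for one character c of str(s); the `getD 0` default is reached only outside Pre_f (on the '-' of a negative s, where Python raises)
def dval (c : Char) : Int := (PySem.Int.ofChars? [c]).getD 0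

-- sum(map(int, str(s)))
def sumDigitsA (s : Int) : Int := ((PySem.Int.toChars s).map dval).sum

-- A's recursion; the fuel (e - s).toNat only makes it total: on Pre_f every recursive call increases s by ≥ 1, so the fuel is never exhausted
def fA : Nat → Int → Int → Int
  | 0, s, e => if s > e then 0 else if s = e then 1 else 0
  | fuel+1, s, e =>
      if s > e then 0
      else if s = e then 1
      else fA fuel (s + 2) e + fA fuel (s + sumDigitsA s) e

def f (s : Int) (e : Int) : Int := fA (e - s).toNat s e

-- ===== PORT B =====
-- sum(map(int, str(abs(n))))
def sumDigitsB (n : Int) : Int := ((PySem.Int.toChars |n|).map dval).sum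

-- one iteration of B's loop body at index i
def dpStep (s : Int) (m : Nat) (dp : List Int) (i : Nat) : List Int :=
  dp.set i
    ((if i + 2 ≤ m then dp.getD (i + 2) 0 else 0) +
     (if (i : Int) + sumDigitsB (s + (i : Int)) ≤ (m : Int)
      then dp.getD ((i : Int) + sumDigitsB (s + (i : Int))).toNat 0 else 0))

-- for i in range(m-1, -1, -1): called with k = m, processes i = m-1, ..., 0
def loopB (s : Int) (m : Nat) : Nat → List Int → List Int
  | 0, dp => dp
  | k+1, dp => loopB s m k (dpStep s m dp k)

def f_alt (s : Int) (e : Int) : Int :=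
  if s > e then 0
  else
    let m := (e - s).toNat
    (loopB s m m ((List.replicate (m + 1) (0 : Int)).set m 1)).getD 0 0

-- ===== PRECONDITION & SPEC =====
-- Pre_f excludes only inputs where A raises: for s < 0 < e - s, int('-') raises ValueError; for s = 0 < e the recursion never terminates (RecursionError).
def Pre_f (s : Int) (e : Int) : Prop := e ≤ s ∨ 1 ≤ s
instance (s : Int) (e : Int) : Decidable (Pre_f s e) := by unfold Pre_f; infer_instance

def pvWitness_f : Int × Int := (3, 20)

def Spec_f (s : Int) (e : Int) (out : Int) : Prop := out = f_alt s e
instance (s : Int) (e : Int) (out : Int) : Decidable (Spec_f s e out) := by unfold Spec_f; infer_instance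

-- ===== CLAIM (what is proved, stated in full; the proofs are below) =====
def Claim_equal_f : Prop := ∀ (s : Int) (e : Int), Dom_f s e → Pre_f s e → Spec_f s e (f s e)

-- ===== LEMMAS AND PROOFS =====

-- decimal digit sum of a natural number (proof-side characterisation of sum(map(int,str(n))))
def Sds (n : Nat) : Int :=
  if _h : n < 10 then (n : Int) else ((n % 10 : Nat) : Int) + Sds (n / 10)
decreasing_by omega

lemma Sds_pos (n : Nat) (h1 : 1 ≤ n) : 1 ≤ Sds n := by
  induction n using Sds.induct with
  | case1 n h => rw [Sds]; simp only [h, dite_true]; exact_mod_cast h1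
  | case2 n h ih =>
      rw [Sds]; simp only [h, dite_false]
      have h2 : (0 : Int) ≤ ((n % 10 : Nat) : Int) := Int.natCast_nonneg _
      have h3 : 1 ≤ Sds (n / 10) := ih (by omega)
      linarith

lemma dval_digitChar (d : Nat) (h : d < 10) : dval (Nat.digitChar d) = (d : Int) := by
  interval_cases d <;> decide

lemma core_sum : ∀ (fuel n : Nat) (acc : List Char), n < fuel →
    ((Nat.toDigitsCore 10 fuel n acc).map dval).sum = Sds n + ((acc.map dval).sum) := by
  intro fuel
  induction fuel with
  | zero => intro n acc h; omega
  | succ fl ih =>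
      intro n acc h
      rw [Nat.toDigitsCore]
      by_cases h10 : n / 10 = 0
      · simp only [h10, if_pos, List.map_cons, List.sum_cons,
          dval_digitChar (n % 10) (by omega)]
        rw [Sds]
        have hn : n < 10 := by omega
        simp [hn, Nat.mod_eq_of_lt hn]
      · rw [if_neg h10, ih (n / 10) _ (by omega)]
        simp only [List.map_cons, List.sum_cons, dval_digitChar (n % 10) (by omega)]
        conv_rhs => rw [Sds]
        rw [dif_neg (show ¬ n < 10 by omega)]
        ring

lemma sumA_eq (s : Int) (hs : 0 ≤ s) : sumDigitsA s = Sds s.toNat := by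
  unfold sumDigitsA
  rw [show PySem.Int.toChars s = Nat.toDigits 10 s.toNat by
        simp [PySem.Int.toChars, not_lt.mpr hs]]
  unfold Nat.toDigits
  rw [core_sum (s.toNat + 1) s.toNat [] (by omega)]
  simp

lemma sumA_pos (s : Int) (hs : 1 ≤ s) : 1 ≤ sumDigitsA s := by
  rw [sumA_eq s (by omega)]; exact Sds_pos _ (by omega)

lemma sumB_eq_sumA (s : Int) (hs : 0 ≤ s) : sumDigitsB s = sumDigitsA s := by
  unfold sumDigitsA sumDigitsB; rw [abs_of_nonneg hs]

lemma getD_set_self (l : List Int) (k : Nat) (v : Int) (h : k < l.length) :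
    (l.set k v).getD k 0 = v := by
  simp [List.getD, h]

lemma getD_set_other (l : List Int) (k j : Nat) (v : Int) (h : k ≠ j) :
    (l.set k v).getD j 0 = l.getD j 0 := by
  simp [List.getD, List.getElem?_set_ne h]

lemma fA_le (fuel : Nat) (s e : Int) (h : e ≤ s) :
    fA fuel s e = if s = e then 1 else 0 := by
  cases fuel <;> simp only [fA] <;> split_ifs <;> first | rfl | omega

lemma fA_fuel : ∀ (k : Nat) (s e : Int) (f1 f2 : Nat), (e - s).toNat ≤ k → 1 ≤ s →
    (e - s).toNat ≤ f1 → (e - s).toNat ≤ f2 → fA f1 s e = fA f2 s e := by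
  intro k
  induction k with
  | zero =>
      intro s e f1 f2 hk _ _ _
      rw [fA_le f1 s e (by omega), fA_le f2 s e (by omega)]
  | succ k ih =>
      intro s e f1 f2 hk hs h1 h2
      by_cases hle : e ≤ s
      · rw [fA_le f1 s e hle, fA_le f2 s e hle]
      · obtain ⟨g1, rfl⟩ : ∃ g, f1 = g + 1 := ⟨f1 - 1, by omega⟩
        obtain ⟨g2, rfl⟩ : ∃ g, f2 = g + 1 := ⟨f2 - 1, by omega⟩
        have hds : 1 ≤ sumDigitsA s := sumA_pos s hs
        simp only [fA, if_neg (by omega : ¬ s > e), if_neg (by omega : ¬ s = e)]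
        rw [ih (s + 2) e g1 g2 (by omega) (by omega) (by omega) (by omega),
            ih (s + sumDigitsA s) e g1 g2 (by omega) (by omega) (by omega) (by omega)]

lemma loop_inv (s e : Int) (m : Nat) (hs : 1 ≤ s) (hm : (e - s).toNat = m) :
    ∀ (k : Nat) (dp : List Int), k ≤ m → dp.length = m + 1 →
      (∀ j : Nat, k ≤ j → j ≤ m → dp.getD j 0 = fA (m - j) (s + (j : Int)) e) →
      ∀ j : Nat, j ≤ m → (loopB s m k dp).getD j 0 = fA (m - j) (s + (j : Int)) e := by
  intro k
  induction k with
  | zero => intro dp _ _ hinv j hj; rw [loopB]; exact hinv j (by omega) hj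
  | succ k ih =>
      intro dp hk hlen hinv j hj
      rw [loopB]
      refine ih (dpStep s m dp k) (by omega) (by simp [dpStep, hlen]) ?_ j hj
      intro j' hkj hjm
      unfold dpStep
      by_cases hjk : j' = k
      · subst hjk
        rw [getD_set_self dp j' _ (by omega)]
        have hlt : s + (j' : Int) < e := by omega
        have hsj : (1 : Int) ≤ s + (j' : Int) := by omega
        have hdsB : sumDigitsB (s + (j' : Int)) = sumDigitsA (s + (j' : Int)) :=
          sumB_eq_sumA _ (by omega)
        have hds1 : 1 ≤ sumDigitsA (s + (j' : Int)) := sumA_pos _ hsj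
        rw [hdsB]
        rw [show m - j' = (m - j' - 1) + 1 by omega]
        simp only [fA, if_neg (by omega : ¬ s + (j' : Int) > e),
          if_neg (by omega : ¬ s + (j' : Int) = e)]
        congr 1
        · by_cases h2 : j' + 2 ≤ m
          · rw [if_pos h2, hinv (j' + 2) (by omega) h2,
              fA_fuel m (s + ((j' + 2 : Nat) : Int)) e (m - (j' + 2)) (m - j' - 1)
                (by push_cast; omega) (by push_cast; omega)
                (by push_cast; omega) (by push_cast; omega)]
            congr 1
            push_cast
            ring
          · rw [if_neg h2, fA_le _ _ _ (by omega), if_neg (by omega)]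
        · by_cases h3 : (j' : Int) + sumDigitsA (s + (j' : Int)) ≤ (m : Int)
          · rw [if_pos h3]
            obtain ⟨j2, hj2⟩ : ∃ j2 : Nat, (j2 : Int) = (j' : Int) + sumDigitsA (s + (j' : Int)) :=
              ⟨((j' : Int) + sumDigitsA (s + (j' : Int))).toNat, by omega⟩
            rw [show ((j' : Int) + sumDigitsA (s + (j' : Int))).toNat = j2 by omega,
              hinv j2 (by omega) (by omega),
              fA_fuel m (s + (j2 : Int)) e (m - j2) (m - j' - 1)
                (by omega) (by omega) (by omega) (by omega)]
            congr 1
            omega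
          · rw [if_neg h3, fA_le _ _ _ (by omega), if_neg (by omega)]
      · rw [getD_set_other dp _ j' _ (by omega)]
        exact hinv j' (by omega) hjm

-- ===== VERDICT (by name: the statement is the Claim_ definition above) =====
theorem f_spec : Claim_equal_f := by
  intro s e _ hpre
  unfold Pre_f at hpre
  unfold Spec_f f f_alt
  by_cases hgt : s > e
  · rw [if_pos hgt, fA_le _ _ _ (by omega), if_neg (by omega)]
  · by_cases hs1 : 1 ≤ s
    · rw [if_neg hgt]
      show fA (e - s).toNat s e =
        (loopB s (e - s).toNat (e - s).toNat
          ((List.replicate ((e - s).toNat + 1) (0 : Int)).set (e - s).toNat 1)).getD 0 0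
      have hres := loop_inv s e (e - s).toNat hs1 rfl (e - s).toNat
        ((List.replicate ((e - s).toNat + 1) (0 : Int)).set (e - s).toNat 1)
        le_rfl (by simp) (fun j h1 h2 => by
          have hj : j = (e - s).toNat := by omega
          subst hj
          rw [getD_set_self _ _ _ (by simp),
            show (e - s).toNat - (e - s).toNat = 0 by omega,
            show s + (((e - s).toNat : Nat) : Int) = e by omega]
          simp [fA])
        0 (Nat.zero_le _)
      rw [hres]
      norm_num
    · obtain rfl : s = e := by omega
      simp [fA, loopB, sub_self]
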